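-- pv_equiv track=rewrite | github.com/JosephTLyons/key_stats | key_stats.py | get_printing_items
-- ===== SOURCE A (Python) =====
-- def get_printing_items(sorted_occurrence_character_list_tuple_list):
--     total_characters_entered = 0
--     longest_occurrence_len = 0
--     longest_character_list_string = 0
--
--     for occurrence, character_list in sorted_occurrence_character_list_tuple_list:
--         total_characters_entered += occurrence * len(character_list)
--         length_of_occurrence = len(str(occurrence))
--
--         if length_of_occurrence > longest_occurrence_len:
--             longest_occurrence_len = length_of_occurrence
--
--         # Store this somewhere so it doesn't have to be computed again
--         character_list_string = " ".join(character_list)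
--
--         length_of_character_list_string = len(character_list_string)
--
--         if length_of_character_list_string > longest_character_list_string:
--             longest_character_list_string = length_of_character_list_string
--
--     return total_characters_entered, longest_occurrence_len, longest_character_list_string
-- ===== SOURCE B (Python) =====
-- def get_printing_items(sorted_occurrence_character_list_tuple_list):
--     lst = sorted_occurrence_character_list_tuple_list
--     total_characters_entered = sum(
--         occurrence * len(character_list) for occurrence, character_list in lst
--     )
--     longest_occurrence_len = max(
--         (len(str(occurrence)) for occurrence, _ in lst), default=0
--     )
--     longest_character_list_string = max(
--         (len(" ".join(character_list)) for _, character_list in lst), default=0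
--     )
--     return total_characters_entered, longest_occurrence_len, longest_character_list_string
-- ===== Notes on version B (the rewrite author's own statement) =====
-- stated objective: simpler
-- what changed: Replaces the single fused loop with three mutating accumulators by three independent one-line reductions (a sum and two max-with-default) over the list.
import Mathlib
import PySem

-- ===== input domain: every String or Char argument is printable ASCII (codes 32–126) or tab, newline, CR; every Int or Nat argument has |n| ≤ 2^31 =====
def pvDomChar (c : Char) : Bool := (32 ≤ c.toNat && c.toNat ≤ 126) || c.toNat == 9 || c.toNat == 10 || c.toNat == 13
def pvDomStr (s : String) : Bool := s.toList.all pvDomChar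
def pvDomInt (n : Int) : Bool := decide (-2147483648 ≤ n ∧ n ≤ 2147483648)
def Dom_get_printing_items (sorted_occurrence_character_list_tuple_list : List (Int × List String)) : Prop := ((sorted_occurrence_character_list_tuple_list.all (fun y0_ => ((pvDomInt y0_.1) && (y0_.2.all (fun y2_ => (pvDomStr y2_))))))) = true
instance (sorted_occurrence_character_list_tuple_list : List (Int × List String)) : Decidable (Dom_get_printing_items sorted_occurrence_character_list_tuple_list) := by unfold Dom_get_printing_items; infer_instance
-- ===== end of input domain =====

-- B computes the three results as three independent one-line reductions (sum, max default 0, max default 0)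
-- instead of A's single fused loop over three mutating accumulators; same cost, simpler.

-- ===== PORT A =====
def get_printing_items (sorted_occurrence_character_list_tuple_list : List (Int × List String)) : Int × Int × Int :=
  sorted_occurrence_character_list_tuple_list.foldl
    (fun acc p =>
      let total_characters_entered := acc.1 + p.1 * PySem.List.len p.2
      let length_of_occurrence := PySem.Str.len (PySem.Int.toStr p.1)
      let longest_occurrence_len :=
        if length_of_occurrence > acc.2.1 then length_of_occurrence else acc.2.1
      let character_list_string := PySem.Str.join " " p.2
      let length_of_character_list_string := PySem.Str.len character_list_string
      let longest_character_list_string :=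
        if length_of_character_list_string > acc.2.2 then length_of_character_list_string else acc.2.2
      (total_characters_entered, longest_occurrence_len, longest_character_list_string))
    (0, 0, 0)

-- ===== PORT B =====
def get_printing_items_alt (sorted_occurrence_character_list_tuple_list : List (Int × List String)) : Int × Int × Int :=
  ((sorted_occurrence_character_list_tuple_list.map (fun p => p.1 * PySem.List.len p.2)).sum,
   PySem.List.maxD (sorted_occurrence_character_list_tuple_list.map
     (fun p => PySem.Str.len (PySem.Int.toStr p.1))) (fun x => x) 0,
   PySem.List.maxD (sorted_occurrence_character_list_tuple_list.map
     (fun p => PySem.Str.len (PySem.Str.join " " p.2))) (fun x => x) 0)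

-- ===== PRECONDITION & SPEC =====
def Spec_get_printing_items (sorted_occurrence_character_list_tuple_list : List (Int × List String)) (out : Int × Int × Int) : Prop := out = get_printing_items_alt sorted_occurrence_character_list_tuple_list
instance (sorted_occurrence_character_list_tuple_list : List (Int × List String)) (out : Int × Int × Int) : Decidable (Spec_get_printing_items sorted_occurrence_character_list_tuple_list out) := by unfold Spec_get_printing_items; infer_instance

-- ===== CLAIM (what is proved, stated in full; the proofs are below) =====
def Claim_equal_get_printing_items : Prop := ∀ (sorted_occurrence_character_list_tuple_list : List (Int × List String)), Dom_get_printing_items sorted_occurrence_character_list_tuple_list → Spec_get_printing_items sorted_occurrence_character_list_tuple_list (get_printing_items sorted_occurrence_character_list_tuple_list)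

-- ===== LEMMAS AND PROOFS =====

-- A's fused loop from an arbitrary accumulator state equals a sum and two running maxima.
lemma gpi_loop_eq (l : List (Int × List String)) (t lo lc : Int) :
    l.foldl
      (fun acc p =>
        let total_characters_entered := acc.1 + p.1 * PySem.List.len p.2
        let length_of_occurrence := PySem.Str.len (PySem.Int.toStr p.1)
        let longest_occurrence_len :=
          if length_of_occurrence > acc.2.1 then length_of_occurrence else acc.2.1
        let character_list_string := PySem.Str.join " " p.2
        let length_of_character_list_string := PySem.Str.len character_list_string
        let longest_character_list_string :=
          if length_of_character_list_string > acc.2.2 then length_of_character_list_string else acc.2.2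
        (total_characters_entered, longest_occurrence_len, longest_character_list_string))
      (t, lo, lc)
    = (t + (l.map (fun p => p.1 * PySem.List.len p.2)).sum,
       (l.map (fun p => PySem.Str.len (PySem.Int.toStr p.1))).foldl max lo,
       (l.map (fun p => PySem.Str.len (PySem.Str.join " " p.2))).foldl max lc) := by
  induction l generalizing t lo lc with
  | nil => simp
  | cons x xs ih =>
      simp only [List.foldl_cons, List.map_cons, List.sum_cons, ih]
      refine Prod.ext (by ring) (Prod.ext ?_ ?_) <;> simp only
      · congr 1
        rcases lt_or_ge lo (PySem.Str.len (PySem.Int.toStr x.1)) with h | h <;>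
          simp [max_def] <;> omega
      · congr 1
        rcases lt_or_ge lc (PySem.Str.len (PySem.Str.join " " x.2)) with h | h <;>
          simp [max_def] <;> omega

-- max(ys, default=0) equals the running max from 0 when all elements are nonnegative.
lemma gpi_maxD_eq_foldl (ys : List Int) (h : ∀ y ∈ ys, 0 ≤ y) :
    PySem.List.maxD ys (fun x => x) 0 = ys.foldl max 0 := by
  cases ys with
  | nil => rfl
  | cons x t =>
      have hx : max 0 x = x := max_eq_right (h x (by simp))
      simp [PySem.List.maxD, PySem.List.max?_id_cons, hx]

-- ===== VERDICT (by name: the statement is the Claim_ definition above) =====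
theorem get_printing_items_spec : Claim_equal_get_printing_items := by
  intro l _
  unfold Spec_get_printing_items get_printing_items get_printing_items_alt
  rw [gpi_loop_eq]
  have h1 : ∀ y ∈ l.map (fun p => PySem.Str.len (PySem.Int.toStr p.1)), (0:Int) ≤ y := by
    intro y hy
    simp only [List.mem_map] at hy
    obtain ⟨p, _, rfl⟩ := hy
    simp [PySem.Str.len_eq]
  have h2 : ∀ y ∈ l.map (fun p => PySem.Str.len (PySem.Str.join " " p.2)), (0:Int) ≤ y := by
    intro y hy
    simp only [List.mem_map] at hy
    obtain ⟨p, _, rfl⟩ := hy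
    simp [PySem.Str.len_eq]
  rw [gpi_maxD_eq_foldl _ h1, gpi_maxD_eq_foldl _ h2]
  simp
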